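-- pv_equiv track=rewrite | github.com/grzesikluk/projecteuler | src/main/java/eulerproject/level5/problem107/solution.py | allEdgesVariants
-- ===== SOURCE A (Python) =====
-- import itertools
--
-- def getSublistsWithSameWeight(sortedEdges):
--     lastWeight = -1
--     beginning = 0
--     indexes = []
--
--     for i in range(len(sortedEdges) - 1):
--         if sortedEdges[i][1] == sortedEdges[i + 1][1]:
--             if lastWeight != sortedEdges[i]:
--                 beginning = i
--                 lastWeight = sortedEdges[i][1]
--         else:
--             if lastWeight != -1:
--                 indexes.append([beginning, i])
--             beginning = 0
--             lastWeight = -1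
--
--     return indexes
--
-- def allEdgesVariants(sortedEdges):
--     edgesVariants = [sortedEdges]
--     sublistIndexes = getSublistsWithSameWeight(sortedEdges)
--
--     for sublistIndex in sublistIndexes:
--         newPermutedEdges = []
--         permutations = list(itertools.permutations(sortedEdges[sublistIndex[0]:sublistIndex[1] + 1]))
--
--         for permutedSublist in permutations:
--
--             for existingEdges in edgesVariants:
--                 copy = existingEdges[:]
--                 copy[sublistIndex[0]:sublistIndex[1] + 1] = permutedSublist
--                 newPermutedEdges.append(copy[:])
--
--         edgesVariants = newPermutedEdges[:]
--
--     return edgesVariants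
-- ===== SOURCE B (Python) =====
-- import itertools
--
-- def getSublistsWithSameWeight(sortedEdges):
--     lastWeight = -1
--     beginning = 0
--     indexes = []
--
--     for i in range(len(sortedEdges) - 1):
--         if sortedEdges[i][1] == sortedEdges[i + 1][1]:
--             if lastWeight != sortedEdges[i]:
--                 beginning = i
--                 lastWeight = sortedEdges[i][1]
--         else:
--             if lastWeight != -1:
--                 indexes.append([beginning, i])
--             beginning = 0
--             lastWeight = -1
--
--     return indexes
--
-- def allEdgesVariants(sortedEdges):
--     sublistIndexes = getSublistsWithSameWeight(sortedEdges)
--     groupPerms = [list(itertools.permutations(sortedEdges[b:e + 1]))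
--                   for b, e in sublistIndexes]
--     result = []
--     for combo in itertools.product(*reversed(groupPerms)):
--         copy = sortedEdges[:]
--         for (b, e), perm in zip(sublistIndexes, reversed(combo)):
--             copy[b:e + 1] = perm
--         result.append(copy)
--     return result
-- ===== Notes on version B (the rewrite author's own statement) =====
-- stated objective: alternative
-- what changed: Instead of repeatedly rebuilding the whole variants list once per equal-weight group (A's triple nested loop over evolving state), B forms the cartesian product of the per-group permutation lists (last group most significant) and splices each combination once into a fresh copy of sortedEdges.
import Mathlib
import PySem

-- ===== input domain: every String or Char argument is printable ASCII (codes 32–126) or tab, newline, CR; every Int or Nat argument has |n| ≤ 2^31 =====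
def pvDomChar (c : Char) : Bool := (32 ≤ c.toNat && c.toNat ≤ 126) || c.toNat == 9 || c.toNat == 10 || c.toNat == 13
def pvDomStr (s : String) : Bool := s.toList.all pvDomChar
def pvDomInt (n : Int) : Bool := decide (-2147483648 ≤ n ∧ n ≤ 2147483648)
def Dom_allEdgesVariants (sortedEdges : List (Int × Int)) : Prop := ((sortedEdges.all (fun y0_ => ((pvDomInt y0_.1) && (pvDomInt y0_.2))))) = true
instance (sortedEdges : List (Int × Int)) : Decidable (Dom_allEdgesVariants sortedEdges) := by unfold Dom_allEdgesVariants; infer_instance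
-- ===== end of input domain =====

-- B replaces A's rebuild-all-variants-per-group loop by one cartesian product of the per-group
-- permutation lists, splicing each combination into a single fresh copy (alternative decomposition).

-- ===== PORT A =====

-- Python slice assignment `copy[b:e+1] = p` with step 1: exact hand port
-- (start/stop clamped exactly as Python's slice resolution does, stop floored at start).
def spliceAssign (xs : List (Int × Int)) (b e : Int) (p : List (Int × Int)) : List (Int × Int) :=
  let start := PySem.List.clampIdx xs.length b
  let stop := max start (PySem.List.clampIdx xs.length (e + 1))
  xs.take start ++ p ++ xs.drop stop

-- state = (lastWeight, beginning, indexes).  `lastWeight != sortedEdges[i]` compares an int with a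
-- tuple and is therefore always True in Python, so that branch is ported as unconditionally taken.
-- i ranges over [0, len-1), so `getD` never falls back to its default (exact for in-range indices).
def getSublistsWithSameWeight (sortedEdges : List (Int × Int)) : List (Nat × Nat) :=
  let st := (List.range (sortedEdges.length - 1)).foldl
    (fun (st : Int × Nat × List (Nat × Nat)) i =>
      let lastWeight := st.1
      let beginning := st.2.1
      let indexes := st.2.2
      if (sortedEdges.getD i (0, 0)).2 = (sortedEdges.getD (i + 1) (0, 0)).2 then
        ((sortedEdges.getD i (0, 0)).2, i, indexes)
      else
        if lastWeight ≠ -1 then (-1, 0, indexes ++ [(beginning, i)])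
        else (-1, 0, indexes))
    (-1, 0, [])
  st.2.2

-- itertools.permutations(xs) = PySem.List.permutations xs xs.length
def allEdgesVariants (sortedEdges : List (Int × Int)) : List (List (Int × Int)) :=
  let sublistIndexes := getSublistsWithSameWeight sortedEdges
  sublistIndexes.foldl
    (fun edgesVariants sub =>
      let sl := PySem.List.slice sortedEdges (some (sub.1 : Int)) (some ((sub.2 : Int) + 1))
      let permutations := PySem.List.permutations sl sl.length
      permutations.foldl
        (fun newPermutedEdges permutedSublist =>
          edgesVariants.foldl
            (fun npe existingEdges =>
              npe ++ [spliceAssign existingEdges (sub.1 : Int) (sub.2 : Int) permutedSublist])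
            newPermutedEdges)
        [])
    [sortedEdges]

-- ===== PORT B =====

-- itertools.product(*ls), first list most significant (rightmost varies fastest): exact hand port
def pyProduct {α : Type} : List (List α) → List (List α)
  | [] => [[]]
  | l :: ls => l.flatMap (fun x => (pyProduct ls).map (fun c => x :: c))

def allEdgesVariants_alt (sortedEdges : List (Int × Int)) : List (List (Int × Int)) :=
  let sublistIndexes := getSublistsWithSameWeight sortedEdges
  let groupPerms := sublistIndexes.map (fun be =>
    let g := PySem.List.slice sortedEdges (some (be.1 : Int)) (some ((be.2 : Int) + 1))
    PySem.List.permutations g g.length)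
  (pyProduct groupPerms.reverse).map (fun combo =>
    (sublistIndexes.zip combo.reverse).foldl
      (fun copy bp => spliceAssign copy (bp.1.1 : Int) (bp.1.2 : Int) bp.2)
      sortedEdges)

-- ===== PRECONDITION & SPEC =====
def Spec_allEdgesVariants (sortedEdges : List (Int × Int)) (out : List (List (Int × Int))) : Prop := out = allEdgesVariants_alt sortedEdges
instance (sortedEdges : List (Int × Int)) (out : List (List (Int × Int))) : Decidable (Spec_allEdgesVariants sortedEdges out) := by unfold Spec_allEdgesVariants; infer_instance

-- ===== CLAIM (what is proved, stated in full; the proofs are below) =====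
def Claim_equal_allEdgesVariants : Prop := ∀ (sortedEdges : List (Int × Int)), Dom_allEdgesVariants sortedEdges → Spec_allEdgesVariants sortedEdges (allEdgesVariants sortedEdges)

-- ===== LEMMAS AND PROOFS =====

theorem foldl_append_singleton {β γ : Type} (vs : List γ) (f : γ → β) :
    ∀ (init : List β), vs.foldl (fun a v => a ++ [f v]) init = init ++ vs.map f := by
  induction vs with
  | nil => simp
  | cons v vs ih => intro init; simp [ih]

theorem inner_step {β γ δ : Type} (perms : List β) (vs : List γ) (f : β → γ → δ) :
    ∀ (init : List δ),
      perms.foldl (fun npe p => vs.foldl (fun a v => a ++ [f p v]) npe) init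
        = init ++ perms.flatMap (fun p => vs.map (f p)) := by
  induction perms with
  | nil => simp
  | cons p ps ih =>
    intro init
    rw [List.foldl_cons, foldl_append_singleton, ih, List.flatMap_cons, List.append_assoc]

theorem flatten_map_singleton {α β : Type} (l : List α) (f : α → β) :
    (l.map (fun x => [f x])).flatten = l.map f := by
  induction l <;> simp_all

theorem flatMap_pure {α β : Type} (l : List α) (f : α → β) :
    l.flatMap (fun x => [f x]) = l.map f := by
  induction l <;> simp_all

theorem pyProduct_append_singleton {α : Type} (ls : List (List α)) (l : List α) :
    pyProduct (ls ++ [l]) = (pyProduct ls).flatMap (fun c => l.map (fun x => c ++ [x])) := by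
  induction ls with
  | nil => simp [pyProduct, List.flatMap, flatten_map_singleton]
  | cons a as ih =>
    simp [pyProduct, ih, List.map_flatMap, List.flatMap_map, List.map_map, Function.comp_def,
      List.flatMap_assoc]

theorem foldA_eq {σ β γ : Type} (P : σ → List β) (app : σ → β → γ → γ) :
    ∀ (subs : List σ) (vs : List γ),
      subs.foldl (fun ev sub => (P sub).flatMap (fun p => ev.map (app sub p))) vs
        = (pyProduct (subs.map P).reverse).flatMap (fun combo =>
            vs.map (fun v => (subs.zip combo.reverse).foldl (fun c sp => app sp.1 sp.2 c) v)) := by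
  intro subs
  induction subs with
  | nil => intro vs; simp [pyProduct]
  | cons g rest ih =>
    intro vs
    simp only [List.foldl_cons]
    rw [ih]
    simp [pyProduct_append_singleton, List.map_flatMap, List.flatMap_map, List.map_map,
      Function.comp_def, List.flatMap_assoc]

-- ===== VERDICT (by name: the statement is the Claim_ definition above) =====
theorem allEdgesVariants_spec : Claim_equal_allEdgesVariants := by
  unfold Claim_equal_allEdgesVariants
  intro s _
  unfold Spec_allEdgesVariants allEdgesVariants allEdgesVariants_alt
  simp only [inner_step, List.nil_append]
  rw [foldA_eq
    (fun be : Nat × Nat =>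
      PySem.List.permutations
        (PySem.List.slice s (some (be.1 : Int)) (some ((be.2 : Int) + 1)))
        (PySem.List.slice s (some (be.1 : Int)) (some ((be.2 : Int) + 1))).length)
    (fun sub p v => spliceAssign v (sub.1 : Int) (sub.2 : Int) p)]
  exact flatMap_pure _ _
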